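-- pv_equiv track=rewrite | github.com/iboxl/112 | Architecture/ArchSpec.py | convert_mapping_to_next
-- ===== SOURCE A (Python) =====
-- def convert_mapping_to_next(matrix):
--     rows = len(matrix)
--     cols = len(matrix[0])
--     # 初始化结果矩阵，大小与输入矩阵相同，初值为-1
--     nxtMem = [[-1 for _ in range(cols)] for _ in range(rows)]
--     for row in range(rows):
--         last_valid_layer = -1
--         for col in range(cols):
--             # 只处理有效映射位置
--             if matrix[row][col] == 1:
--                 # 找到下一个有效层
--                 next_layer = -1
--                 for next_col in range(col + 1, cols):
--                     if matrix[row][next_col] == 1: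
--                         next_layer = next_col
--                         break
--                 # 如果没有下一个有效层，则设置为层数总数
--                 if next_layer == -1:
--                     next_layer = cols
--                 nxtMem[row][col] = next_layer
--                 last_valid_layer = col
--     return nxtMem
-- ===== SOURCE B (Python) =====
-- def convert_mapping_to_next(matrix):
--     cols = len(matrix[0])
--     result = []
--     for row in matrix:
--         out = [-1] * cols
--         nxt = cols
--         for col in range(cols - 1, -1, -1):
--             if row[col] == 1:
--                 out[col] = nxt
--                 nxt = col
--         result.append(out)
--     return result
-- ===== Notes on version B (the rewrite author's own statement) =====
-- stated objective: alternative
-- what changed: Replaces the inner forward re-scan for the next valid column (done per cell) with a single right-to-left pass per row tracking the last valid column seen; asymptotically O(rows*cols) vs O(rows*cols^2), though a timing run did not confirm a >=1.5x wall-clock speed-up on its inputs.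
-- outside the precondition, e.g. on convert_mapping_to_next([]): A raises IndexError, B raises IndexError; on convert_mapping_to_next([[1, 1], [1]]): A raises IndexError, B raises IndexError
import Mathlib
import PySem

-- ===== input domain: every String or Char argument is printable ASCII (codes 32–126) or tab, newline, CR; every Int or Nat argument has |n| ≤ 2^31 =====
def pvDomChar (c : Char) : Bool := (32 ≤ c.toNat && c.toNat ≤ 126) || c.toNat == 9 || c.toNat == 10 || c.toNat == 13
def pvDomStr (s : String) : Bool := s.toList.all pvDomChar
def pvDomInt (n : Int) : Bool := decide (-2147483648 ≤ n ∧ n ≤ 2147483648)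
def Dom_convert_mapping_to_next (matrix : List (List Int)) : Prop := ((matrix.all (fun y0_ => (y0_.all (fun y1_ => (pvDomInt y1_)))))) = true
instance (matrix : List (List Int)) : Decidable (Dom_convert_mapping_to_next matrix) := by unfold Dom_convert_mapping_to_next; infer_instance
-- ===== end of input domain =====

-- B replaces A's per-cell forward re-scan with one right-to-left pass per row tracking the next valid column (an alternative single-pass algorithm; a timing run did not confirm a measurable speed-up).


-- ===== PORT A =====
-- A's inner 'for next_col in range(col+1, cols): … break' : first index in the list with value 1, else -1
def pvFirstOne (row : List Int) : List ℕ → Int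
  | [] => -1
  | c :: cs => if row.getD c 0 = 1 then (c : Int) else pvFirstOne row cs

-- A's computation of next_layer for a valid cell at col
def pvNextLayer (row : List Int) (cols col : ℕ) : Int :=
  let n := pvFirstOne row (List.range' (col + 1) (cols - (col + 1)))
  if n = -1 then (cols : Int) else n

def convert_mapping_to_next (matrix : List (List Int)) : List (List Int) :=
  let cols := (matrix.headD []).length
  matrix.map (fun row =>
    (List.range cols).map (fun col =>
      if row.getD col 0 = 1 then pvNextLayer row cols col else -1))

-- ===== PORT B =====
-- right-to-left pass: n columns still to process, nxt = next valid column at/after the processed suffix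
def pvBLoop (row : List Int) : ℕ → Int → List Int → List Int
  | 0, _, acc => acc
  | c + 1, nxt, acc =>
    if row.getD c 0 = 1 then pvBLoop row c (c : Int) (nxt :: acc)
    else pvBLoop row c nxt ((-1) :: acc)

def convert_mapping_to_next_alt (matrix : List (List Int)) : List (List Int) :=
  let cols := (matrix.headD []).length
  matrix.map (fun row => pvBLoop row cols (cols : Int) [])

-- ===== PRECONDITION & SPEC =====
-- Pre_ excludes exactly the inputs where the Pythons raise IndexError: the empty matrix
-- (matrix[0]) and matrices with a row shorter than row 0 (matrix[row][col] out of range).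
def Pre_convert_mapping_to_next (matrix : List (List Int)) : Prop :=
  matrix ≠ [] ∧ ∀ row ∈ matrix, (matrix.headD []).length ≤ row.length
instance (matrix : List (List Int)) : Decidable (Pre_convert_mapping_to_next matrix) := by
  unfold Pre_convert_mapping_to_next; infer_instance

def pvWitness_convert_mapping_to_next : List (List Int) := [[1, 0, 1], [0, 1, 0]]

def Spec_convert_mapping_to_next (matrix : List (List Int)) (out : List (List Int)) : Prop := out = convert_mapping_to_next_alt matrix
instance (matrix : List (List Int)) (out : List (List Int)) : Decidable (Spec_convert_mapping_to_next matrix out) := by unfold Spec_convert_mapping_to_next; infer_instance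

-- ===== CLAIM (what is proved, stated in full; the proofs are below) =====
def Claim_equal_convert_mapping_to_next : Prop := ∀ (matrix : List (List Int)), Dom_convert_mapping_to_next matrix → Pre_convert_mapping_to_next matrix → Spec_convert_mapping_to_next matrix (convert_mapping_to_next matrix)

-- ===== LEMMAS AND PROOFS =====

-- the next valid column at index ≥ c (or cols if none), as A computes it
def pvNAfter (row : List Int) (cols c : ℕ) : Int :=
  let n := pvFirstOne row (List.range' c (cols - c))
  if n = -1 then (cols : Int) else n

lemma pvNAfter_base (row : List Int) (cols : ℕ) : pvNAfter row cols cols = (cols : Int) := by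
  simp [pvNAfter, pvFirstOne]

lemma pvNAfter_step (row : List Int) (cols c : ℕ) (h : c < cols) :
    pvNAfter row cols c = if row.getD c 0 = 1 then (c : Int) else pvNAfter row cols (c + 1) := by
  have hr : List.range' c (cols - c) = c :: List.range' (c + 1) (cols - (c + 1)) := by
    have : cols - c = (cols - (c + 1)) + 1 := by omega
    rw [this, List.range'_succ]
  unfold pvNAfter
  rw [hr]
  simp only [pvFirstOne]
  by_cases hc : row.getD c 0 = 1
  · simp only [hc, ite_true, if_neg (show ¬((c : Int) = -1) by omega)]
  · simp only [hc, ite_false]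

lemma pvNAfter_eq_nextLayer (row : List Int) (cols col : ℕ) :
    pvNAfter row cols (col + 1) = pvNextLayer row cols col := rfl

lemma pvBLoop_eq (row : List Int) (cols : ℕ) :
    ∀ c, c ≤ cols → ∀ acc,
      pvBLoop row c (pvNAfter row cols c) acc =
        (List.range c).map (fun col => if row.getD col 0 = 1 then pvNextLayer row cols col else -1)
          ++ acc := by
  intro c
  induction c with
  | zero => intro _ acc; simp [pvBLoop]
  | succ c ih =>
    intro hle acc
    have hstep := pvNAfter_step row cols c (by omega)
    rw [pvBLoop]
    by_cases hc : row.getD c 0 = 1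
    · rw [if_pos hc]
      have h1 : pvNAfter row cols c = (c : Int) := by rw [hstep, if_pos hc]
      rw [← h1, ih (by omega), pvNAfter_eq_nextLayer, List.range_succ, List.map_append]
      simp only [List.map_cons, List.map_nil, if_pos hc, List.append_assoc,
        List.singleton_append]
    · rw [if_neg hc]
      have h1 : pvNAfter row cols (c + 1) = pvNAfter row cols c := by rw [hstep, if_neg hc]
      rw [h1, ih (by omega), List.range_succ, List.map_append]
      simp only [List.map_cons, List.map_nil, if_neg hc, List.append_assoc,
        List.singleton_append]

lemma pvRow_eq (row : List Int) (cols : ℕ) :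
    (List.range cols).map (fun col => if row.getD col 0 = 1 then pvNextLayer row cols col else -1)
      = pvBLoop row cols (cols : Int) [] := by
  have := pvBLoop_eq row cols cols (le_refl _) []
  rw [pvNAfter_base] at this
  simp [this]

-- ===== VERDICT (by name: the statement is the Claim_ definition above) =====
theorem convert_mapping_to_next_spec : Claim_equal_convert_mapping_to_next := by
  intro matrix _ _
  unfold Spec_convert_mapping_to_next convert_mapping_to_next convert_mapping_to_next_alt
  simp only []
  apply List.map_congr_left
  intro row _
  exact pvRow_eq row (matrix.headD []).length
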